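-- pv_equiv track=rewrite | github.com/dhruvbaid/AdventOfCode2020 | Day 20/Day 20.py | convert
-- ===== SOURCE A (Python) =====
-- def convert(a: str):
--     res1 = 0
--     for i in range(len(a)):
--         if a[i] == "#":
--             res1 = res1 | (1 << i)
--     b = a[::-1]
--     res2 = 0
--     for i in range(len(b)):
--         if b[i] == "#":
--             res2 = res2 | (1 << i)
--     return [res1, res2]
-- ===== SOURCE B (Python) =====
-- def convert(a: str):
--     r1 = 0
--     r2 = 0
--     p = 1
--     for ch in a:
--         bit = 1 if ch == "#" else 0
--         r1 += bit * p
--         r2 = 2 * r2 + bit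
--         p *= 2
--     return [r1, r2]
-- ===== Notes on version B (the rewrite author's own statement) =====
-- stated objective: alternative
-- what changed: B replaces A's two index-based scans (one over the string, one over its reversal) and its bitwise or/shift operations by a single Horner-style pass over the characters that maintains both masks arithmetically: r1 accumulates bit*p with a doubling place value p, and r2 is built most-significant-bit-first as 2*r2+bit, so no reversal, indexing or shifting occurs.
import Mathlib
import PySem

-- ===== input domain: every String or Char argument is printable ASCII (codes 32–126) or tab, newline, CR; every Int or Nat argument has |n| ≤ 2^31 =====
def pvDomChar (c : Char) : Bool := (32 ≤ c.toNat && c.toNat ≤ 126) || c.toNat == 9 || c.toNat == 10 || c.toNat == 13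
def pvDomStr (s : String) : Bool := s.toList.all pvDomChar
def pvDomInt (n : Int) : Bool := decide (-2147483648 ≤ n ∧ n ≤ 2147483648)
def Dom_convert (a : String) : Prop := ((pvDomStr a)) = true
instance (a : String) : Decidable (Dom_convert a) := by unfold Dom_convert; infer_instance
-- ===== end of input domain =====

-- B replaces A's two index scans and bitwise or/shift by one Horner pass over the characters;
-- same return value, objective: alternative decomposition.

-- ===== PORT A =====
-- a[i] with i drawn from range(len(a)) is always in range, so pyGetD with a dummy default is exact;
-- the shift amount i is a nonnegative Python int, ported as the same Int.
def convert (a : String) : List Int :=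
  let res1 := (PySem.List.pyRange 0 (PySem.Str.len a) 1).foldl
    (fun res1 i =>
      if PySem.List.pyGetD a.toList i ' ' = '#' then PySem.Int.bor res1 ((1 : Int) <<< i) else res1) 0
  let b := (PySem.List.slice? a.toList none none (-1)).getD []   -- a[::-1]; step -1 never yields none
  let res2 := (PySem.List.pyRange 0 ((b.length : Int)) 1).foldl
    (fun res2 i =>
      if PySem.List.pyGetD b i ' ' = '#' then PySem.Int.bor res2 ((1 : Int) <<< i) else res2) 0
  [res1, res2]

-- ===== PORT B =====
-- single `for ch in a` pass carrying (r1, r2, p); pure arithmetic, no indices or bit operations.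
def convert_alt (a : String) : List Int :=
  let s := a.toList.foldl
    (fun (st : Int × Int × Int) ch =>
      let bit : Int := if ch = '#' then 1 else 0
      (st.1 + bit * st.2.2, 2 * st.2.1 + bit, 2 * st.2.2))
    (0, 0, 1)
  [s.1, s.2.1]

-- ===== PRECONDITION & SPEC =====
def Spec_convert (a : String) (out : List Int) : Prop := out = convert_alt a
instance (a : String) (out : List Int) : Decidable (Spec_convert a out) := by unfold Spec_convert; infer_instance

-- ===== CLAIM (what is proved, stated in full; the proofs are below) =====
def Claim_equal_convert : Prop := ∀ (a : String), Dom_convert a → Spec_convert a (convert a)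

-- ===== LEMMAS AND PROOFS =====

/-- the bitmask a `#`-scan of `l` builds: bit `i` set iff `l[i] = '#'`. -/
def pvBits : List Char → Nat
  | [] => 0
  | c :: t => (if c = '#' then 1 else 0) + 2 * pvBits t

theorem pvBits_append (xs : List Char) (c : Char) :
    pvBits (xs ++ [c]) = pvBits xs + (if c = '#' then 1 else 0) * 2 ^ xs.length := by
  induction xs with
  | nil => simp [pvBits]
  | cons d t ih => simp only [List.cons_append, pvBits, ih, List.length_cons, pow_succ]; ring

/-- or-ing a fresh high bit onto a small accumulator is addition. -/
theorem pvOrPow (acc k : Nat) (h : acc < 2 ^ k) : acc ||| 1 <<< k = acc + 2 ^ k := by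
  have h2 := Nat.two_pow_add_eq_or_of_lt h 1
  rw [mul_one] at h2
  rw [Nat.shiftLeft_eq, one_mul, Nat.or_comm, ← h2, Nat.add_comm]

/-- core lemma for A's index-scan loops: the fold over `range' k d` reading `L` builds
    `pvBits` of the window, shifted by `2^k`, or-ed onto a small accumulator. -/
theorem pvFoldIdx (L : List Char) : ∀ (d k acc : Nat), k + d ≤ L.length → acc < 2 ^ k →
    (List.range' k d).foldl
      (fun acc i => if L.getD i ' ' = '#' then acc ||| 1 <<< i else acc) acc
    = acc + 2 ^ k * pvBits ((L.drop k).take d) := by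
  intro d
  induction d with
  | zero => intro k acc _ _; simp [pvBits]
  | succ d ih =>
      intro k acc hk hacc
      have hkL : k < L.length := by omega
      rw [List.range'_succ, List.foldl_cons]
      rw [List.drop_eq_getElem_cons hkL, List.take_succ_cons]
      set bit : Nat := if L[k] = '#' then 1 else 0 with hbit
      have hget : L.getD k ' ' = L[k] := List.getD_eq_getElem L ' ' hkL
      have hstep : (if L.getD k ' ' = '#' then acc ||| 1 <<< k else acc) = acc + bit * 2 ^ k := by
        rw [hget, hbit]
        split
        · rw [pvOrPow acc k hacc]; ring
        · ring
      rw [hstep]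
      have hlt : acc + bit * 2 ^ k < 2 ^ (k + 1) := by
        have : bit ≤ 1 := by rw [hbit]; split <;> omega
        rw [pow_succ]; nlinarith
      rw [ih (k + 1) _ (by omega) hlt]
      simp only [pvBits, pow_succ]
      ring

/-- A-style index loop over `pyRange 0 n 1` on the Int side equals `pvBits L`. -/
theorem pvScanInt (L : List Char) :
    (PySem.List.pyRange 0 ((L.length : Int)) 1).foldl
      (fun r i => if PySem.List.pyGetD L i ' ' = '#' then PySem.Int.bor r ((1 : Int) <<< i) else r) 0
    = ((pvBits L : Nat) : Int) := by
  rw [PySem.List.pyRange_zero_natCast]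
  simp only [List.foldl_map]
  have hstep : ∀ (r : Nat) (i : Nat),
      (fun (acc : Int) (k : Nat) =>
        if PySem.List.pyGetD L ((k : Int)) ' ' = '#' then PySem.Int.bor acc ((1 : Int) <<< ((k : Int))) else acc)
        ((fun (x : Nat) => ((x : Int))) r) i
      = (fun (x : Nat) => ((x : Int)))
          ((fun (acc : Nat) (k : Nat) => if L.getD k ' ' = '#' then acc ||| 1 <<< k else acc) r i) := by
    intro r i
    simp only
    rw [PySem.List.pyGetD_natCast, Int.shiftLeft_natCast_right]
    have h1 : ((1 : Int) <<< i) = (((1 <<< i : Nat) : Nat) : Int) := rfl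
    split
    · rw [h1, PySem.Int.bor_natCast]
    · rfl
  have hh := List.foldl_hom (f := fun (x : Nat) => ((x : Int)))
    (g₂ := fun (acc : Int) (k : Nat) =>
        if PySem.List.pyGetD L ((k : Int)) ' ' = '#' then PySem.Int.bor acc ((1 : Int) <<< ((k : Int))) else acc)
    (g₁ := fun (acc : Nat) (k : Nat) => if L.getD k ' ' = '#' then acc ||| 1 <<< k else acc)
    (l := List.range L.length) (init := 0) hstep
  rw [show (0 : Int) = (((0 : Nat)) : Int) from rfl, hh]
  congr 1
  rw [List.range_eq_range', pvFoldIdx L L.length 0 0 (by omega) (by simp)]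
  simp

theorem convert_eval (a : String) :
    convert a = [((pvBits a.toList : Nat) : Int), ((pvBits a.toList.reverse : Nat) : Int)] := by
  have hb : (PySem.List.slice? a.toList none none (-1)).getD ([] : List Char)
      = a.toList.reverse := by
    rw [PySem.List.slice?_none_none_neg_one]; rfl
  show [_, _] = _
  rw [hb, PySem.Str.len_eq, pvScanInt a.toList, pvScanInt a.toList.reverse]

/-- B's Horner pass: closed form of the fold's three components. -/
theorem pvHorner (l : List Char) : ∀ (r1 r2 p : Int),
    l.foldl
      (fun (st : Int × Int × Int) ch =>
        let bit : Int := if ch = '#' then 1 else 0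
        (st.1 + bit * st.2.2, 2 * st.2.1 + bit, 2 * st.2.2)) (r1, r2, p)
    = (r1 + p * ((pvBits l : Nat) : Int),
       r2 * 2 ^ l.length + ((pvBits l.reverse : Nat) : Int),
       p * 2 ^ l.length) := by
  induction l with
  | nil => intro r1 r2 p; simp [pvBits]
  | cons c t ih =>
      intro r1 r2 p
      rw [List.foldl_cons]
      simp only
      rw [ih]
      have hrev : pvBits (c :: t).reverse
          = pvBits t.reverse + (if c = '#' then 1 else 0) * 2 ^ t.length := by
        rw [List.reverse_cons, pvBits_append, List.length_reverse]
      refine Prod.ext ?_ (Prod.ext ?_ ?_)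
      · show r1 + (if c = '#' then (1 : Int) else 0) * p + 2 * p * ((pvBits t : Nat) : Int)
            = r1 + p * ((pvBits (c :: t) : Nat) : Int)
        simp only [pvBits]
        push_cast
        split <;> ring
      · show (2 * r2 + (if c = '#' then (1 : Int) else 0)) * 2 ^ t.length
              + ((pvBits t.reverse : Nat) : Int)
            = r2 * 2 ^ (c :: t).length + ((pvBits (c :: t).reverse : Nat) : Int)
        rw [hrev, List.length_cons]
        push_cast
        split <;> ring
      · show 2 * p * 2 ^ t.length = p * 2 ^ (c :: t).length
        rw [List.length_cons]; ring

theorem convert_alt_eval (a : String) :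
    convert_alt a
    = [((pvBits a.toList : Nat) : Int), ((pvBits a.toList.reverse : Nat) : Int)] := by
  show [_, _] = _
  rw [pvHorner a.toList 0 0 1]
  simp

-- ===== VERDICT (by name: the statement is the Claim_ definition above) =====
theorem convert_spec : Claim_equal_convert := by
  intro a _
  unfold Spec_convert
  rw [convert_eval, convert_alt_eval]
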